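-- pv_equiv track=rewrite | github.com/neganngdev/app-store-review-scraper-gui | app/engine.py | validate_app_id
-- ===== SOURCE A (Python) =====
-- def validate_app_id(app_id: str) -> bool:
--     """
--     Validate if an app ID is in the correct format.
--
--     Args:
--         app_id: The app's package name to validate
--
--     Returns:
--         True if valid format, False otherwise
--     """
--     if not app_id or not isinstance(app_id, str):
--         return False
--
--     # Basic validation: should contain at least one dot and only valid characters
--     parts = app_id.split(".")
--     if len(parts) < 2:
--         return False
--
--     # Check if all parts contain valid characters (alphanumeric and underscore)
--     for part in parts:
--         if not part or not all(c.isalnum() or c == "_" for c in part):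
--             return False
--
--     return True
-- ===== SOURCE B (Python) =====
-- def validate_app_id(app_id: str) -> bool:
--     """Single-pass character scan: no parts list is built."""
--     if not app_id or not isinstance(app_id, str):
--         return False
--     saw_dot = False
--     prev_dot = True  # start of string acts like a part boundary
--     for c in app_id:
--         if c == ".":
--             if prev_dot:
--                 return False
--             saw_dot = True
--             prev_dot = True
--         elif c.isalnum() or c == "_":
--             prev_dot = False
--         else:
--             return False
--     return saw_dot and not prev_dot
-- ===== Notes on version B (the rewrite author's own statement) =====
-- stated objective: alternative
-- what changed: Replaced split-on-dot plus parts list plus nested all() loop by a single character-level scan maintaining two boolean flags (previous character was a separator or start; a separator was seen) with early exit; no intermediate parts list is materialised.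
import Mathlib
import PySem

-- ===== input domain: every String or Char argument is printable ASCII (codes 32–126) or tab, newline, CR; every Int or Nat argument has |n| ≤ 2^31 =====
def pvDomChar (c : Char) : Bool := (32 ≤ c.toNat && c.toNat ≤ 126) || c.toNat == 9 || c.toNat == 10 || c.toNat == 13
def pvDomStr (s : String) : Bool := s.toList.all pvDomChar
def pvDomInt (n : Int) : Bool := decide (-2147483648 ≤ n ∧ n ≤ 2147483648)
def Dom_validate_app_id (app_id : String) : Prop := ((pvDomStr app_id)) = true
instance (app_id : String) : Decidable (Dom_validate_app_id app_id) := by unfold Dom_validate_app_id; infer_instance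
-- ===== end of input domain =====

-- B replaces A's split-on-dot + parts-list + nested loop by a single character-level scan
-- maintaining two boolean flags (objective: alternative).


-- ===== PORT A =====
-- c.isalnum() or c == "_"
def pyValidChar (c : Char) : Bool := PySem.Chars.isalnum c || c == '_'

-- the for-loop over parts with its early returns
def aPartsLoop : List (List Char) → Bool
  | [] => true
  | p :: ps => if p.isEmpty || !(p.all pyValidChar) then false else aPartsLoop ps

def validate_app_id (app_id : String) : Bool :=
  if app_id.toList.isEmpty then false
  else
    let parts := PySem.Chars.splitOn app_id.toList ['.']
    if parts.length < 2 then false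
    else aPartsLoop parts

-- ===== PORT B =====
-- the single-pass scan: state (saw_dot, prev_dot), early returns become false
def altLoop : List Char → Bool → Bool → Bool
  | [], sawDot, prevDot => sawDot && !prevDot
  | c :: rest, sawDot, prevDot =>
      if c == '.' then
        if prevDot then false else altLoop rest true true
      else if pyValidChar c then altLoop rest sawDot false
      else false

def validate_app_id_alt (app_id : String) : Bool :=
  if app_id.toList.isEmpty then false
  else altLoop app_id.toList false true

-- ===== PRECONDITION & SPEC =====
def Spec_validate_app_id (app_id : String) (out : Bool) : Prop := out = validate_app_id_alt app_id
instance (app_id : String) (out : Bool) : Decidable (Spec_validate_app_id app_id out) := by unfold Spec_validate_app_id; infer_instance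

-- ===== CLAIM (what is proved, stated in full; the proofs are below) =====
def Claim_equal_validate_app_id : Prop := ∀ (app_id : String), Dom_validate_app_id app_id → Spec_validate_app_id app_id (validate_app_id app_id)

-- ===== LEMMAS AND PROOFS =====

-- (head, rest of parts) of splitting on '.', as a structural recursion
def dotParts : List Char → List Char × List (List Char)
  | [] => ([], [])
  | c :: cs =>
      let r := dotParts cs
      if c = '.' then ([], r.1 :: r.2) else (c :: r.1, r.2)

def goodPart (p : List Char) : Bool := !p.isEmpty && p.all pyValidChar

theorem splitOn_go_dot (l : List Char) : ∀ (fuel : Nat) (cur : List Char)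
    (acc : List (List Char)), l.length ≤ fuel →
    PySem.Chars.splitOn.go ['.'] fuel l cur acc =
      acc.reverse ++ (cur.reverse ++ (dotParts l).1) :: (dotParts l).2 := by
  induction l with
  | nil =>
    intro fuel cur acc _
    cases fuel <;> simp [PySem.Chars.splitOn.go, dotParts]
  | cons c rest ih =>
    intro fuel cur acc h
    cases fuel with
    | zero => simp at h
    | succ f =>
      by_cases hc : c = '.'
      · subst hc
        rw [show PySem.Chars.splitOn.go ['.'] (f+1) ('.' :: rest) cur acc
              = PySem.Chars.splitOn.go ['.'] f rest [] (cur.reverse :: acc) by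
            simp [PySem.Chars.splitOn.go, List.isPrefixOf]]
        rw [ih f [] (cur.reverse :: acc) (by simpa using h)]
        simp [dotParts]
      · rw [show PySem.Chars.splitOn.go ['.'] (f+1) (c :: rest) cur acc
              = PySem.Chars.splitOn.go ['.'] f rest (c :: cur) acc by
            simp [PySem.Chars.splitOn.go, List.isPrefixOf, Ne.symm hc]]
        rw [ih f (c :: cur) acc (by simpa using Nat.le_of_succ_le_succ h)]
        simp [dotParts, hc]

theorem splitOn_dot (l : List Char) :
    PySem.Chars.splitOn l ['.'] = (dotParts l).1 :: (dotParts l).2 := by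
  have := splitOn_go_dot l (l.length + 1) [] [] (by omega)
  simpa [PySem.Chars.splitOn] using this

theorem aPartsLoop_eq_all (ps : List (List Char)) :
    aPartsLoop ps = ps.all goodPart := by
  induction ps with
  | nil => rfl
  | cons p ps ih =>
    cases hE : p.isEmpty <;> cases hA : p.all pyValidChar <;>
      simp [aPartsLoop, goodPart, hE, hA, ih]

theorem altLoop_eq (l : List Char) : ∀ (sawDot prevDot : Bool),
    altLoop l sawDot prevDot =
      ((if prevDot then goodPart (dotParts l).1 else (dotParts l).1.all pyValidChar)
        && (dotParts l).2.all goodPart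
        && (sawDot || !(dotParts l).2.isEmpty)) := by
  induction l with
  | nil =>
    intro sawDot prevDot
    cases prevDot <;> simp [altLoop, dotParts, goodPart]
  | cons c rest ih =>
    intro sawDot prevDot
    by_cases hc : c = '.'
    · subst hc
      cases prevDot with
      | true => simp [altLoop, dotParts, goodPart]
      | false =>
        simp only [altLoop, beq_self_eq_true, if_true, Bool.false_eq_true, if_false]
        rw [ih true true]
        simp [dotParts, goodPart, Bool.and_comm]
    · by_cases hv : pyValidChar c = true
      · simp only [altLoop, beq_iff_eq, hc, if_false, hv, if_true]
        rw [ih sawDot false]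
        cases prevDot <;> simp [dotParts, hc, goodPart, hv]
      · simp [altLoop, hc, hv, dotParts, goodPart]

-- ===== VERDICT (by name: the statement is the Claim_ definition above) =====
theorem validate_app_id_spec : Claim_equal_validate_app_id := by
  intro s _
  unfold Spec_validate_app_id validate_app_id validate_app_id_alt
  by_cases he : s.toList.isEmpty
  · simp [he]
  · simp only [he, Bool.false_eq_true, if_false]
    rw [splitOn_dot, altLoop_eq, aPartsLoop_eq_all]
    rcases h2 : (dotParts s.toList).2 with _ | ⟨q, qs⟩
    · simp
    · simp [goodPart, List.all_cons, Bool.and_assoc, Bool.and_comm, Bool.and_left_comm]
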